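-- pv_equiv track=rewrite | github.com/RisPNG/pycro-station | pycros/BoM--to--MSL/main.py | _process_zipper
-- ===== SOURCE A (Python) =====
-- from typing import List, Tuple, Any, Optional
--
-- def _process_zipper(source: str) -> str:
--     lines = source.splitlines()
--     if len(lines) < 5:
--         return source
--
--     codes: List[str] = []
--     for idx in range(5):
--         code = (lines[idx] if idx < len(lines) else "")[:3]
--         if not code.strip():
--             continue
--         if code not in codes:
--             codes.append(code)
--
--     result_parts: List[str] = []
--     for code in codes:
--         if code.strip().upper() == "NOCOLR":
--             continue
--         segments: List[str] = []
--         for j in range(5):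
--             line_val = (lines[j] if j < len(lines) else "")[:3]
--             if code == line_val:
--                 if j == 0:
--                     segments.append("TP")
--                 elif j == 1:
--                     segments.append("TH")
--                 elif j == 2:
--                     segments.append("PL")
--                 elif j == 3:
--                     segments.append("SL")
--                 elif j == 4:
--                     segments.append("SP")
--         if segments:
--             text = "/".join(segments)
--             if " " in code:
--                 text += f":#{code[:3]} - "
--             else:
--                 text += f":#{code} - "
--             result_parts.append(text)
--
--     result = "".join(result_parts)
--     if len(lines) >= 6:
--         if result:
--             result = result + "\n" + lines[5]
--         else:
--             result = "\n" + lines[5]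
--
--     return result if result else source
-- ===== SOURCE B (Python) =====
-- def _process_zipper(source: str) -> str:
--     lines = source.splitlines()
--     if len(lines) < 5:
--         return source
--     labels = ("TP", "TH", "PL", "SL", "SP")
--     table = {}
--     for j in range(5):
--         code = lines[j][:3]
--         if code.strip():
--             table[code] = table.get(code, []) + [labels[j]]
--     parts = []
--     for code, segs in table.items():
--         if code.strip().upper() != "NOCOLR":
--             parts.append("/".join(segs) + f":#{code} - ")
--     result = "".join(parts)
--     if len(lines) >= 6:
--         result = result + "\n" + lines[5]
--     return result if result else source
-- ===== Notes on version B (the rewrite author's own statement) =====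
-- stated objective: alternative
-- what changed: B replaces A's dedup-list plus per-code rescan of the five lines (nested loops) with a single grouping pass into an insertion-ordered dict keyed by code, then emits one part per dict entry, dropping A's dead segments-empty and re-slicing branches and merging the empty-result tail branch.
import Mathlib
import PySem

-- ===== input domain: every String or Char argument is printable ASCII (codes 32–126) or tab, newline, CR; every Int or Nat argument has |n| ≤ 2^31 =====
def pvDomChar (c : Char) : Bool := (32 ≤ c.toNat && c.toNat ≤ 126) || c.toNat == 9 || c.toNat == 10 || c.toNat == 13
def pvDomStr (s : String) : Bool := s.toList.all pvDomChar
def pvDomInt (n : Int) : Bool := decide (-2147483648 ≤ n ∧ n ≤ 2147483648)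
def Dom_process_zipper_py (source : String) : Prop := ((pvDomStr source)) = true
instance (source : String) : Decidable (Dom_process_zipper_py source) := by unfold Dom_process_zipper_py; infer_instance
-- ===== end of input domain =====

-- B builds the code→labels table in ONE scan of the five lines (an insertion-ordered dict),
-- replacing A's per-code rescan of all five lines; same return value everywhere (objective: alternative).

-- ===== PORT A =====
-- (lines[idx] if idx < len(lines) else "")[:3]
def pvLineA (lines : List String) (idx : Int) : String :=
  PySem.Str.slice (if idx < PySem.List.len lines then PySem.List.pyGetD lines idx "" else "") none (some 3)

def process_zipper_py (source : String) : String :=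
  let lines := PySem.Str.splitlines source
  if lines.length < 5 then source
  else
    let codes : List String := (PySem.List.pyRange 0 5 1).foldl (fun codes idx =>
      let code := pvLineA lines idx
      if PySem.Str.strip code == "" then codes
      else if codes.contains code then codes else codes ++ [code]) []
    let result_parts : List String := codes.foldl (fun parts code =>
      if PySem.Str.upper (PySem.Str.strip code) == "NOCOLR" then parts
      else
        let segments : List String := (PySem.List.pyRange 0 5 1).foldl (fun segs j =>
          let line_val := pvLineA lines j
          if code == line_val then
            if j = 0 then segs ++ ["TP"]
            else if j = 1 then segs ++ ["TH"]
            else if j = 2 then segs ++ ["PL"]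
            else if j = 3 then segs ++ ["SL"]
            else if j = 4 then segs ++ ["SP"]
            else segs
          else segs) []
        if segments.isEmpty then parts
        else
          let text := PySem.Str.join "/" segments
          let text := if PySem.Str.isIn " " code
            then text ++ ":#" ++ PySem.Str.slice code none (some 3) ++ " - "
            else text ++ ":#" ++ code ++ " - "
          parts ++ [text]) []
    let result := PySem.Str.join "" result_parts
    let result := if 6 ≤ lines.length then
        (if result == "" then "\n" ++ PySem.List.pyGetD lines 5 ""
         else result ++ "\n" ++ PySem.List.pyGetD lines 5 "")
      else result
    if result == "" then source else result

-- ===== PORT B =====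
-- lines[j][:3]
def pvCodeB (lines : List String) (j : Int) : String :=
  PySem.Str.slice (PySem.List.pyGetD lines j "") none (some 3)

def process_zipper_py_alt (source : String) : String :=
  let lines := PySem.Str.splitlines source
  if lines.length < 5 then source
  else
    let labels : List String := ["TP", "TH", "PL", "SL", "SP"]
    -- table[code] = table.get(code, []) + [labels[j]]  is Dict.modify
    let table : PySem.Dict String (List String) := (PySem.List.pyRange 0 5 1).foldl (fun d j =>
      let code := pvCodeB lines j
      if PySem.Str.strip code == "" then d
      else d.modify code [] (· ++ [PySem.List.pyGetD labels j ""])) PySem.Dict.empty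
    let parts : List String := table.items.foldl (fun parts p =>
      if PySem.Str.upper (PySem.Str.strip p.1) == "NOCOLR" then parts
      else parts ++ [PySem.Str.join "/" p.2 ++ ":#" ++ p.1 ++ " - "]) []
    let result := PySem.Str.join "" parts
    let result := if 6 ≤ lines.length then result ++ "\n" ++ PySem.List.pyGetD lines 5 "" else result
    if result == "" then source else result

-- ===== PRECONDITION & SPEC =====
def Spec_process_zipper_py (source : String) (out : String) : Prop := out = process_zipper_py_alt source
instance (source : String) (out : String) : Decidable (Spec_process_zipper_py source out) := by unfold Spec_process_zipper_py; infer_instance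

-- ===== CLAIM (what is proved, stated in full; the proofs are below) =====
def Claim_equal_process_zipper_py : Prop := ∀ (source : String), Dom_process_zipper_py source → Spec_process_zipper_py source (process_zipper_py source)

-- ===== LEMMAS AND PROOFS =====

-- the (idx < len(lines)) guard in A is always true for idx in range(5) when len(lines) >= 5
theorem pvLineA_eq_pvCodeB (L : List String) (h5 : ¬ L.length < 5) :
    ∀ idx ∈ ([0,1,2,3,4] : List Int), pvLineA L idx = pvCodeB L idx := by
  intro idx hidx
  unfold pvLineA pvCodeB
  rw [if_pos (by simp [PySem.List.len]; fin_cases hidx <;> omega)]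

-- codes[:3] sliced again to [:3] is itself
theorem pv_slice3_idem (s : String) :
    PySem.Str.slice (PySem.Str.slice s none (some 3)) none (some 3) = PySem.Str.slice s none (some 3) := by
  have h : ∀ l : List Char, PySem.List.slice l none (some 3) = l.take 3 := fun l => by
    rw [PySem.List.slice_to _ (by omega)]; rfl
  simp [PySem.Str.slice, h, List.take_take]

-- A's dedupping codes loop is Set.ofList of the non-blank codes
theorem pv_codes_eq (L : List String) :
    ([0,1,2,3,4] : List Int).foldl (fun codes idx =>
        if PySem.Str.strip (pvCodeB L idx) == "" then codes
        else if codes.contains (pvCodeB L idx) then codes else codes ++ [pvCodeB L idx]) []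
    = PySem.Set.ofList ((([0,1,2,3,4] : List Int).filter
        (fun j => !(PySem.Str.strip (pvCodeB L j) == ""))).map (pvCodeB L)) := by
  have flip : (fun (cs : List String) idx => if (PySem.Str.strip (pvCodeB L idx) == "") = true then cs
       else if cs.contains (pvCodeB L idx) = true then cs else cs ++ [pvCodeB L idx])
    = (fun cs idx => if (!(PySem.Str.strip (pvCodeB L idx) == "")) = true then PySem.Set.add cs (pvCodeB L idx) else cs) := by
    funext cs idx
    cases h : PySem.Str.strip (pvCodeB L idx) == "" <;> simp [PySem.Set.add, PySem.Set.contains]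
  rw [flip, PySem.List.foldl_if_eq_foldl_filter, ← PySem.Set.update_map_eq_foldl_add,
    PySem.Set.update_nil_left]

-- B's guarded dict loop is the pairs fold over the non-blank (code, label) pairs
theorem pv_table_eq (L : List String) (lab : Int → String) :
    ([0,1,2,3,4] : List Int).foldl (fun d j =>
        if PySem.Str.strip (pvCodeB L j) == "" then d
        else d.modify (pvCodeB L j) [] (· ++ [lab j])) PySem.Dict.empty
    = ((([0,1,2,3,4] : List Int).filter (fun j => !(PySem.Str.strip (pvCodeB L j) == ""))).map
        (fun j => (pvCodeB L j, lab j))).foldl (fun d q => d.modify q.1 [] (· ++ [q.2])) PySem.Dict.empty := by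
  have flip : (fun (d : PySem.Dict String (List String)) j =>
        if (PySem.Str.strip (pvCodeB L j) == "") = true then d
        else d.modify (pvCodeB L j) [] (· ++ [lab j]))
      = (fun d j => if (!(PySem.Str.strip (pvCodeB L j) == "")) = true then d.modify (pvCodeB L j) [] (· ++ [lab j]) else d) := by
    funext d j; cases h : PySem.Str.strip (pvCodeB L j) == "" <;> simp
  rw [flip, PySem.List.foldl_if_eq_foldl_filter, List.foldl_map]

-- the table's value at a non-blank code c is exactly the labels of the positions carrying c
theorem pv_value_eq (L : List String) (c : String) (lab : Int → String) (hc : ¬ PySem.Str.strip c = "") :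
    (((([0,1,2,3,4] : List Int).filter (fun j => !(PySem.Str.strip (pvCodeB L j) == ""))).map
        (fun j => (pvCodeB L j, lab j))).filter (fun q => q.1 == c)).map (·.2)
    = (([0,1,2,3,4] : List Int).filter (fun j => c == pvCodeB L j)).map lab := by
  rw [List.filter_map, List.filter_filter, List.map_map]
  have hpt : ∀ j : Int, ((pvCodeB L j == c) && !(PySem.Str.strip (pvCodeB L j) == "")) = (c == pvCodeB L j) := by
    intro j
    by_cases h : pvCodeB L j = c
    · subst h; simp [hc]
    · have hb : (pvCodeB L j == c) = false := by simp [h]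
      have hb2 : (c == pvCodeB L j) = false := by simp [Ne.symm h]
      rw [hb, hb2]
      simp
  simp only [Function.comp_apply]
  rw [List.filter_congr (fun j _ => hpt j)]
  simp [Function.comp]

-- A splits on result == "" before appending line 6; B appends to "" directly — same string
theorem pv_tail (r t src : String) :
    (if (if (r == "") = true then "\n" ++ t else r ++ "\n" ++ t) == "" then src
     else (if (r == "") = true then "\n" ++ t else r ++ "\n" ++ t))
    = (if (r ++ "\n" ++ t) == "" then src else r ++ "\n" ++ t) := by
  by_cases hr : (r == "") = true
  · have hr' : r = "" := by simpa using hr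
    subst hr'
    rw [if_pos hr]
    have e : ("" : String) ++ "\n" ++ t = "\n" ++ t := by simp
    rw [e]
  · rw [if_neg hr]

set_option maxHeartbeats 2000000 in
theorem pv_main (source : String) : process_zipper_py source = process_zipper_py_alt source := by
  unfold process_zipper_py process_zipper_py_alt
  by_cases h5 : (PySem.Str.splitlines source).length < 5
  · simp only [if_pos h5]
  · simp only [if_neg h5]
    have hR : PySem.List.pyRange 0 5 1 = ([0,1,2,3,4] : List Int) := by decide
    simp only [hR]
    set L := PySem.Str.splitlines source with hLdef
    -- A's codes loop, with the guard discharged, is Set.ofList of the non-blank codes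
    have hcodes : ([0,1,2,3,4] : List Int).foldl (fun codes idx =>
        if PySem.Str.strip (pvLineA L idx) == "" then codes
        else if codes.contains (pvLineA L idx) then codes else codes ++ [pvLineA L idx]) []
      = PySem.Set.ofList ((([0,1,2,3,4] : List Int).filter
          (fun j => !(PySem.Str.strip (pvCodeB L j) == ""))).map (pvCodeB L)) := by
      refine Eq.trans (PySem.List.foldl_congr_mem _ _ _ _ ?_) (pv_codes_eq L)
      intro acc x hx; rw [pvLineA_eq_pvCodeB L h5 x hx]
    rw [hcodes]
    -- B's dict loop is the pairs fold
    rw [pv_table_eq L (fun j => PySem.List.pyGetD ["TP","TH","PL","SL","SP"] j "")]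
    -- the dict's items are the codes paired with their label lists
    have hnodup : (((([0,1,2,3,4] : List Int).filter
          (fun j => !(PySem.Str.strip (pvCodeB L j) == ""))).map
          (fun j => (pvCodeB L j, PySem.List.pyGetD ["TP","TH","PL","SL","SP"] j ""))).foldl
          (fun d q => d.modify q.1 [] (· ++ [q.2])) PySem.Dict.empty).keys.Nodup :=
      PySem.Dict.nodup_keys_foldl_modify_key _ _ _ _ _ (by simp)
    have hkeys : (((([0,1,2,3,4] : List Int).filter
          (fun j => !(PySem.Str.strip (pvCodeB L j) == ""))).map
          (fun j => (pvCodeB L j, PySem.List.pyGetD ["TP","TH","PL","SL","SP"] j ""))).foldl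
          (fun d q => d.modify q.1 [] (· ++ [q.2])) PySem.Dict.empty).keys
        = PySem.Set.ofList ((([0,1,2,3,4] : List Int).filter
          (fun j => !(PySem.Str.strip (pvCodeB L j) == ""))).map (pvCodeB L)) := by
      rw [PySem.Dict.keys_foldl_modify_key]
      simp only [PySem.Dict.keys_empty, PySem.Set.update_nil_left, List.map_map]
      congr 1
    have hitems : (((([0,1,2,3,4] : List Int).filter
          (fun j => !(PySem.Str.strip (pvCodeB L j) == ""))).map
          (fun j => (pvCodeB L j, PySem.List.pyGetD ["TP","TH","PL","SL","SP"] j ""))).foldl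
          (fun d q => d.modify q.1 [] (· ++ [q.2])) PySem.Dict.empty).items
        = (PySem.Set.ofList ((([0,1,2,3,4] : List Int).filter
            (fun j => !(PySem.Str.strip (pvCodeB L j) == ""))).map (pvCodeB L))).map
            (fun c => (c, (((([0,1,2,3,4] : List Int).filter
              (fun j => !(PySem.Str.strip (pvCodeB L j) == ""))).map
              (fun j => (pvCodeB L j, PySem.List.pyGetD ["TP","TH","PL","SL","SP"] j ""))).filter
              (fun q => q.1 == c)).map (·.2))) := by
      rw [PySem.Dict.items_eq_map_keys _ hnodup [], hkeys]
      refine List.map_congr_left fun c _ => ?_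
      rw [PySem.Dict.getD_foldl_modify_append]
      simp
    rw [hitems, List.foldl_map]
    -- pointwise agreement of the two result-building loops over the same code list
    have hparts : ∀ (parts : List String) (c : String),
        c ∈ PySem.Set.ofList ((([0,1,2,3,4] : List Int).filter
          (fun j => !(PySem.Str.strip (pvCodeB L j) == ""))).map (pvCodeB L)) →
        (if PySem.Str.upper (PySem.Str.strip c) == "NOCOLR" then parts
         else
          if (([0,1,2,3,4] : List Int).foldl (fun segs j =>
              if c == pvLineA L j then
                if j = 0 then segs ++ ["TP"] else if j = 1 then segs ++ ["TH"]
                else if j = 2 then segs ++ ["PL"] else if j = 3 then segs ++ ["SL"]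
                else if j = 4 then segs ++ ["SP"] else segs
              else segs) []).isEmpty then parts
          else parts ++ [if PySem.Str.isIn " " c then
              PySem.Str.join "/" (([0,1,2,3,4] : List Int).foldl (fun segs j =>
                if c == pvLineA L j then
                  if j = 0 then segs ++ ["TP"] else if j = 1 then segs ++ ["TH"]
                  else if j = 2 then segs ++ ["PL"] else if j = 3 then segs ++ ["SL"]
                  else if j = 4 then segs ++ ["SP"] else segs
                else segs) []) ++ ":#" ++ PySem.Str.slice c none (some 3) ++ " - "
            else
              PySem.Str.join "/" (([0,1,2,3,4] : List Int).foldl (fun segs j =>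
                if c == pvLineA L j then
                  if j = 0 then segs ++ ["TP"] else if j = 1 then segs ++ ["TH"]
                  else if j = 2 then segs ++ ["PL"] else if j = 3 then segs ++ ["SL"]
                  else if j = 4 then segs ++ ["SP"] else segs
                else segs) []) ++ ":#" ++ c ++ " - "])
        = (if PySem.Str.upper (PySem.Str.strip c) == "NOCOLR" then parts
           else parts ++ [PySem.Str.join "/" ((((([0,1,2,3,4] : List Int).filter
              (fun j => !(PySem.Str.strip (pvCodeB L j) == ""))).map
              (fun j => (pvCodeB L j, PySem.List.pyGetD ["TP","TH","PL","SL","SP"] j ""))).filter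
              (fun q => q.1 == c)).map (·.2)) ++ ":#" ++ c ++ " - "]) := by
      intro parts c hc
      rw [PySem.Set.mem_ofList] at hc
      obtain ⟨j, hjJ, hfj⟩ := List.mem_map.mp hc
      obtain ⟨hjR, hpj⟩ := List.mem_filter.mp hjJ
      have hcstrip : ¬ PySem.Str.strip c = "" := by
        rw [← hfj]; simpa using hpj
      by_cases hNo : (PySem.Str.upper (PySem.Str.strip c) == "NOCOLR") = true
      · rw [if_pos hNo, if_pos hNo]
      · rw [if_neg hNo, if_neg hNo]
        have hseg : ([0,1,2,3,4] : List Int).foldl (fun segs j =>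
            if c == pvLineA L j then
              if j = 0 then segs ++ ["TP"] else if j = 1 then segs ++ ["TH"]
              else if j = 2 then segs ++ ["PL"] else if j = 3 then segs ++ ["SL"]
              else if j = 4 then segs ++ ["SP"] else segs
            else segs) []
          = (((([0,1,2,3,4] : List Int).filter
              (fun j => !(PySem.Str.strip (pvCodeB L j) == ""))).map
              (fun j => (pvCodeB L j, PySem.List.pyGetD ["TP","TH","PL","SL","SP"] j ""))).filter
              (fun q => q.1 == c)).map (·.2) := by
          refine Eq.trans (PySem.List.foldl_congr_mem _ _ (fun segs j =>
              if c == pvCodeB L j then segs ++ [PySem.List.pyGetD ["TP","TH","PL","SL","SP"] j ""] else segs)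
            _ ?_) ?_
          · intro segs jv hjv
            fin_cases hjv <;>
              rw [pvLineA_eq_pvCodeB L h5 _ (by simp)] <;> norm_num [PySem.List.pyGetD] <;> rfl
          · rw [PySem.List.foldl_append_if (fun j => c == pvCodeB L j)
              (fun j => PySem.List.pyGetD ["TP","TH","PL","SL","SP"] j "") ([0,1,2,3,4] : List Int) []]
            rw [pv_value_eq L c _ hcstrip]
            simp
        rw [hseg]
        have hne : ((((([0,1,2,3,4] : List Int).filter
              (fun j => !(PySem.Str.strip (pvCodeB L j) == ""))).map
              (fun j => (pvCodeB L j, PySem.List.pyGetD ["TP","TH","PL","SL","SP"] j ""))).filter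
              (fun q => q.1 == c)).map (·.2)).isEmpty = false := by
          rw [pv_value_eq L c _ hcstrip]
          have hmem : j ∈ ([0,1,2,3,4] : List Int).filter (fun j => c == pvCodeB L j) :=
            List.mem_filter.mpr ⟨hjR, by simp [hfj]⟩
          simp only [List.isEmpty_eq_false_iff, ne_eq]
          intro habs
          rw [List.map_eq_nil_iff] at habs
          exact List.ne_nil_of_mem hmem habs
        rw [hne]
        simp only [Bool.false_eq_true, if_false]
        have hc3 : PySem.Str.slice c none (some 3) = c := by
          rw [← hfj]
          show PySem.Str.slice (pvCodeB L j) none (some 3) = pvCodeB L j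
          unfold pvCodeB
          exact pv_slice3_idem _
        rw [hc3, ite_self]
    have hAB := PySem.List.foldl_congr_mem _ _ _ ([] : List String) hparts
    rw [hAB]
    -- identical tails; A splits on result == "" where B appends to "" directly
    generalize hgen : (PySem.Str.join "" (List.foldl (fun acc x => if (PySem.Str.upper (PySem.Str.strip x) == "NOCOLR") = true then acc else acc ++ [PySem.Str.join "/" (List.map (fun y => y.2) (List.filter (fun q => q.1 == x) (List.map (fun j => (pvCodeB L j, PySem.List.pyGetD ["TP", "TH", "PL", "SL", "SP"] j "")) (List.filter (fun j => !(PySem.Str.strip (pvCodeB L j) == "")) ([0, 1, 2, 3, 4] : List Int))))) ++ ":#" ++ x ++ " - "]) [] (PySem.Set.ofList (List.map (pvCodeB L) (List.filter (fun j => !(PySem.Str.strip (pvCodeB L j) == "")) ([0, 1, 2, 3, 4] : List Int)))))) = r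
    by_cases h6 : 6 ≤ L.length
    · rw [if_pos h6, if_pos h6]
      exact pv_tail r (PySem.List.pyGetD L 5 "") source
    · rw [if_neg h6, if_neg h6]



-- ===== VERDICT (by name: the statement is the Claim_ definition above) =====
theorem process_zipper_py_spec : Claim_equal_process_zipper_py := by
  intro source _
  exact pv_main source
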